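-- pv_equiv track=rewrite | github.com/nikmomo/LiveEdge | scripts/figures/odr_trajectory.py | get_contiguous_regions
-- ===== SOURCE A (Python) =====
-- def get_contiguous_regions(mask):
--     """Get start and end indices of contiguous True regions."""
--     regions = []
--     in_region = False
--     start = 0
--
--     for i, val in enumerate(mask):
--         if val and not in_region:
--             start = i
--             in_region = True
--         elif not val and in_region:
--             regions.append((start, i-1))
--             in_region = False
--
--     if in_region:
--         regions.append((start, len(mask)-1))
--
--     return regions
-- ===== SOURCE B (Python) =====
-- def get_contiguous_regions(mask):
--     """Get start and end indices of contiguous True regions (edge detection)."""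
--     n = len(mask)
--     starts = [i for i in range(n) if mask[i] and (i == 0 or not mask[i - 1])]
--     ends = [i for i in range(n) if mask[i] and (i == n - 1 or not mask[i + 1])]
--     return list(zip(starts, ends))
-- ===== Notes on version B (the rewrite author's own statement) =====
-- stated objective: alternative
-- what changed: Replaces A's stateful single pass (in_region flag + pending start) by stateless edge detection: collect rising-edge indices and falling-edge indices in two comprehensions over neighbours and zip them.
import Mathlib
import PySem

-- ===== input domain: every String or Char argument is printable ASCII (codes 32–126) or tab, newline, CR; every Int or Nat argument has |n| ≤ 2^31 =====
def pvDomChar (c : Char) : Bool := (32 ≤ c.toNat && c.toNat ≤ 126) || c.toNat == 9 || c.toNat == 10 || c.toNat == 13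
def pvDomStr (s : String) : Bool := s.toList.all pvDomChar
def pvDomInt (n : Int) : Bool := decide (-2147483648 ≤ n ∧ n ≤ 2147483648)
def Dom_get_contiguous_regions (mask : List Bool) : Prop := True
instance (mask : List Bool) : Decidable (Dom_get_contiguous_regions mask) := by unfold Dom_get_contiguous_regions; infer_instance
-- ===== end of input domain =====

-- B replaces A's stateful single pass by stateless edge detection (starts/ends lists zipped); same O(n) cost, different decomposition.

-- ===== PORT A =====
-- loop body of A: state (regions, in_region, start), element (i, val)
def pvStepA (st : List (Int × Int) × Bool × Int) (p : Int × Bool) :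
    List (Int × Int) × Bool × Int :=
  match st, p with
  | (regions, in_region, start), (i, val) =>
    if val && !in_region then (regions, true, i)
    else if !val && in_region then (regions ++ [(start, i - 1)], false, start)
    else (regions, in_region, start)

def get_contiguous_regions (mask : List Bool) : List (Int × Int) :=
  match (PySem.List.enumerate mask).foldl pvStepA ([], false, 0) with
  | (regions, in_region, start) =>
    if in_region then regions ++ [(start, PySem.List.len mask - 1)] else regions

-- ===== PORT B =====
-- indices i in range(n) are Nat and in bounds, so mask[i] is ported as getD (exact here)
def get_contiguous_regions_alt (mask : List Bool) : List (Int × Int) :=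
  let n := mask.length
  let starts := ((List.range n).filter
      (fun i => mask.getD i false && (i == 0 || !(mask.getD (i - 1) false)))).map
      (fun i => Int.ofNat i)
  let ends := ((List.range n).filter
      (fun i => mask.getD i false && (i == n - 1 || !(mask.getD (i + 1) false)))).map
      (fun i => Int.ofNat i)
  starts.zip ends

-- ===== PRECONDITION & SPEC =====
def Spec_get_contiguous_regions (mask : List Bool) (out : List (Int × Int)) : Prop := out = get_contiguous_regions_alt mask
instance (mask : List Bool) (out : List (Int × Int)) : Decidable (Spec_get_contiguous_regions mask out) := by unfold Spec_get_contiguous_regions; infer_instance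

-- ===== CLAIM (what is proved, stated in full; the proofs are below) =====
def Claim_equal_get_contiguous_regions : Prop := ∀ (mask : List Bool), Dom_get_contiguous_regions mask → Spec_get_contiguous_regions mask (get_contiguous_regions mask)

-- ===== LEMMAS AND PROOFS =====

-- canonical run decomposition over Nat indices: runsOutN i l = regions of l (l starts at absolute
-- index i), currently not inside a region; runsInN s e l = inside a region started at s whose last
-- seen element sits at index e (l starts at index e+1)
mutual
def runsOutN : Nat → List Bool → List (Nat × Nat)
  | _, [] => []
  | i, false :: t => runsOutN (i + 1) t
  | i, true :: t => runsInN i i t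
def runsInN : Nat → Nat → List Bool → List (Nat × Nat)
  | s, e, [] => [(s, e)]
  | s, e, true :: t => runsInN s (e + 1) t
  | s, e, false :: t => (s, e) :: runsOutN (e + 2) t
end

def pvCast2 (p : Nat × Nat) : Int × Int := (Int.ofNat p.1, Int.ofNat p.2)

-- relative rising-edge indices of l given the value just before l
def startsR : Bool → List Bool → List Nat
  | _, [] => []
  | prev, b :: t => (if b && !prev then [0] else []) ++ (startsR b t).map (· + 1)

-- relative falling-edge indices of l
def endsR : List Bool → List Nat
  | [] => []
  | b :: t => (if b && !(t.headD false) then [0] else []) ++ (endsR t).map (· + 1)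

-- generalized start predicate (value before index 0 is prev)
def sPgen (prev : Bool) (l : List Bool) (i : Nat) : Bool :=
  l.getD i false && !(if i = 0 then prev else l.getD (i - 1) false)

def eGen (l : List Bool) (i : Nat) : Bool :=
  l.getD i false && !(l.getD (i + 1) false)

lemma sP_eq_sPgen (l : List Bool) (i : Nat) :
    (l.getD i false && (i == 0 || !(l.getD (i - 1) false))) = sPgen false l i := by
  cases i <;> simp [sPgen]

lemma eP_eq_eGen (l : List Bool) (i : Nat) :
    (l.getD i false && (i == l.length - 1 || !(l.getD (i + 1) false))) = eGen l i := by
  by_cases h : i + 1 < l.length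
  · have hne : (i == l.length - 1) = false := by simp; omega
    simp [eGen, hne]
  · have hnone : l[i + 1]? = none := by
      rw [List.getElem?_eq_none_iff]; omega
    simp [eGen, List.getD, hnone]

lemma filt_starts : ∀ (l : List Bool) (prev : Bool),
    (List.range l.length).filter (sPgen prev l) = startsR prev l := by
  intro l
  induction l with
  | nil => intro prev; simp [startsR]
  | cons b t ih =>
    intro prev
    simp only [List.length_cons, List.range_succ_eq_map, List.filter_cons, List.filter_map]
    have hcomp : (sPgen prev (b :: t)) ∘ Nat.succ = sPgen b t := by
      funext i; cases i <;> simp [sPgen]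
    rw [hcomp, ih b]
    have h0 : sPgen prev (b :: t) 0 = (b && !prev) := by simp [sPgen]
    simp only [startsR, h0]
    split <;> simp

lemma filt_ends : ∀ (l : List Bool),
    (List.range l.length).filter (eGen l) = endsR l := by
  intro l
  induction l with
  | nil => simp [endsR]
  | cons b t ih =>
    simp only [List.length_cons, List.range_succ_eq_map, List.filter_cons, List.filter_map]
    have hcomp : (eGen (b :: t)) ∘ Nat.succ = eGen t := by
      funext i; simp [eGen]
    rw [hcomp, ih]
    have h0 : eGen (b :: t) 0 = (b && !(t.headD false)) := by
      cases t <;> simp [eGen]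
    simp only [endsR, h0]
    split <;> simp

lemma comp_shift (k : Nat) : ((fun x => k + x) ∘ (fun x : Nat => x + 1)) = (fun i => k + 1 + i) := by
  funext i; simp [Function.comp]; omega

lemma zipRuns : ∀ (l : List Bool) (ofs : Nat),
    (((startsR false l).map (ofs + ·)).zip ((endsR l).map (ofs + ·)) = runsOutN ofs l)
    ∧ (∀ s : Nat,
        ((s :: (startsR true l).map (ofs + 1 + ·)).zip
           ((if l.headD false then [] else [ofs]) ++ (endsR l).map (ofs + 1 + ·))
          = runsInN s ofs l)) := by
  intro l
  induction l with
  | nil =>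
    intro ofs
    exact ⟨by simp [startsR, endsR, runsOutN], fun s => by simp [startsR, endsR, runsInN]⟩
  | cons b t ih =>
    intro ofs
    constructor
    · cases b with
      | false =>
        have h1 := (ih (ofs + 1)).1
        simp only [startsR, endsR, runsOutN]
        simpa [List.map_map, comp_shift] using h1
      | true =>
        have h2 := (ih ofs).2 ofs
        simp only [startsR, endsR, runsOutN]
        cases ht : t.headD false <;> simp only [ht] at h2 <;>
          simpa [List.map_map, comp_shift, ht] using h2
    · intro s
      cases b with
      | false =>
        have h1 := (ih (ofs + 2)).1
        have hsh : ∀ xs : List Nat, xs.map (fun i => ofs + 2 + i) = xs.map (fun i => ofs + 1 + 1 + i) := by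
          intro xs; apply List.map_congr_left; intro i _; omega
        simp only [startsR, endsR, runsInN, List.headD_cons]
        rw [hsh, hsh] at h1
        simpa [List.map_map, comp_shift] using h1
      | true =>
        have h2 := (ih (ofs + 1)).2 s
        have hsh : ∀ xs : List Nat, xs.map (fun i => ofs + 1 + 1 + i) = xs.map (fun i => ofs + 2 + i) := by
          intro xs; apply List.map_congr_left; intro i _; omega
        simp only [startsR, endsR, runsInN, List.headD_cons]
        cases ht : t.headD false <;> simp only [ht] at h2 <;> rw [hsh] at h2 <;>
          simpa [List.map_map, comp_shift, ht] using h2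

-- casting the Nat-level runs gives the Int-level values A produces
mutual
def runsOut : Int → List Bool → List (Int × Int)
  | _, [] => []
  | i, false :: t => runsOut (i + 1) t
  | i, true :: t => runsIn i (i + 1) t
def runsIn : Int → Int → List Bool → List (Int × Int)
  | s, i, [] => [(s, i - 1)]
  | s, i, true :: t => runsIn s (i + 1) t
  | s, i, false :: t => (s, i - 1) :: runsOut (i + 1) t
end

lemma runs_cast : ∀ (l : List Bool),
    (∀ i : Nat, runsOut (i : Int) l = (runsOutN i l).map pvCast2)
    ∧ (∀ s e : Nat, runsIn (s : Int) ((e : Int) + 1) l = (runsInN s e l).map pvCast2) := by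
  intro l
  induction l with
  | nil =>
    refine ⟨fun i => by simp [runsOut, runsOutN], fun s e => ?_⟩
    simp [runsIn, runsInN, pvCast2]
  | cons b t ih =>
    constructor
    · intro i
      cases b with
      | false =>
        show runsOut ((i : Int) + 1) t = _
        rw [show ((i : Int) + 1) = ((i + 1 : Nat) : Int) by push_cast; ring]
        exact ih.1 (i + 1)
      | true =>
        show runsIn (i : Int) ((i : Int) + 1) t = _
        exact ih.2 i i
    · intro s e
      cases b with
      | false =>
        show (( s : Int), (e : Int) + 1 - 1) :: runsOut ((e : Int) + 1 + 1) t = _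
        rw [show ((e : Int) + 1 + 1) = ((e + 2 : Nat) : Int) by push_cast; ring]
        rw [ih.1 (e + 2)]
        simp [runsInN, pvCast2]
      | true =>
        show runsIn (s : Int) ((e : Int) + 1 + 1) t = _
        rw [show ((e : Int) + 1 + 1) = ((e + 1 : Nat) : Int) + 1 by push_cast; ring]
        exact ih.2 s (e + 1)

-- finishing step of A (the trailing-region append)
def pvFinish (n : Int) (st : List (Int × Int) × Bool × Int) : List (Int × Int) :=
  match st with
  | (regs, inr, s) => if inr then regs ++ [(s, n - 1)] else regs

lemma foldA : ∀ (l : List Bool) (i : Int) (regs : List (Int × Int)),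
    (∀ s0, pvFinish (i + l.length) ((PySem.List.enumerate l i).foldl pvStepA (regs, false, s0))
        = regs ++ runsOut i l)
    ∧ (∀ s, pvFinish (i + l.length) ((PySem.List.enumerate l i).foldl pvStepA (regs, true, s))
        = regs ++ runsIn s i l) := by
  intro l
  induction l with
  | nil =>
    intro i regs
    constructor
    · intro s0; simp [PySem.List.enumerate_nil, pvFinish, runsOut]
    · intro s; simp [PySem.List.enumerate_nil, pvFinish, runsIn]
  | cons b t ih =>
    intro i regs
    have hlen : (i + ((b :: t).length : Int)) = (i + 1) + (t.length : Int) := by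
      simp [List.length_cons]; ring
    constructor
    · intro s0
      rw [PySem.List.enumerate_cons, List.foldl_cons, hlen]
      cases b with
      | true =>
        rw [show pvStepA (regs, false, s0) (i, true) = (regs, true, i) from by simp [pvStepA]]
        rw [(ih (i + 1) regs).2 i]
        rfl
      | false =>
        rw [show pvStepA (regs, false, s0) (i, false) = (regs, false, s0) from by simp [pvStepA]]
        rw [(ih (i + 1) regs).1 s0]
        rfl
    · intro s
      rw [PySem.List.enumerate_cons, List.foldl_cons, hlen]
      cases b with
      | true =>
        rw [show pvStepA (regs, true, s) (i, true) = (regs, true, s) from by simp [pvStepA]]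
        rw [(ih (i + 1) regs).2 s]
        rfl
      | false =>
        rw [show pvStepA (regs, true, s) (i, false) = (regs ++ [(s, i - 1)], false, s) from by
          simp [pvStepA]]
        rw [(ih (i + 1) (regs ++ [(s, i - 1)])).1 s]
        simp [runsIn, List.append_assoc]

lemma a_eq_runs (mask : List Bool) : get_contiguous_regions mask = runsOut 0 mask := by
  have h := (foldA mask 0 []).1 0
  unfold get_contiguous_regions
  rw [show (0 : Int) + (mask.length : Int) = (mask.length : Int) by ring] at h
  rcases hst : (PySem.List.enumerate mask 0).foldl pvStepA ([], false, 0) with ⟨regs, inr, s⟩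
  rw [hst] at h
  simp only [pvFinish, List.nil_append] at h
  simpa [PySem.List.len_eq] using h

lemma zip_cast (xs ys : List Nat) :
    (xs.map (fun i => Int.ofNat i)).zip (ys.map (fun i => Int.ofNat i)) = (xs.zip ys).map pvCast2 := by
  induction xs generalizing ys with
  | nil => rfl
  | cons x xs ih =>
    cases ys with
    | nil => rfl
    | cons y ys =>
      simp only [List.map_cons, List.zip_cons_cons]
      rw [ih]
      rfl

lemma b_eq_runs (mask : List Bool) : get_contiguous_regions_alt mask = runsOut 0 mask := by
  show (let n := mask.length;
    let starts := ((List.range n).filter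
        (fun i => mask.getD i false && (i == 0 || !(mask.getD (i - 1) false)))).map
        (fun i => Int.ofNat i);
    let ends := ((List.range n).filter
        (fun i => mask.getD i false && (i == n - 1 || !(mask.getD (i + 1) false)))).map
        (fun i => Int.ofNat i);
    starts.zip ends) = runsOut 0 mask
  simp only
  rw [List.filter_congr (fun i _ => sP_eq_sPgen mask i),
      List.filter_congr (fun i _ => eP_eq_eGen mask i),
      filt_starts mask false, filt_ends mask]
  have hz := (zipRuns mask 0).1
  have hid : ∀ xs : List Nat, xs.map (0 + ·) = xs := by
    intro xs; simp
  rw [hid, hid] at hz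
  have hcast := (runs_cast mask).1 0
  rw [zip_cast, hz]
  rw [show ((0:Nat):Int) = (0:Int) from rfl] at hcast
  rw [hcast]

-- ===== VERDICT (by name: the statement is the Claim_ definition above) =====
theorem get_contiguous_regions_spec : Claim_equal_get_contiguous_regions := by
  intro mask _
  unfold Spec_get_contiguous_regions
  rw [a_eq_runs, b_eq_runs]
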